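-- pv_equiv track=rewrite | github.com/dth2701/Leetcode-Tracking | TIP102/Unit 1: Strings and Arrays/s2Standard.py | goldilocks_approved
-- ===== SOURCE A (Python) =====
-- def goldilocks_approved(nums):
--     # Check if list has fewer than 3 numbers
--     if (len(nums) < 3): return -1
--
--     # Check if only positive int
--     for num in nums:
--         if num <= 0: return -1
--
--     # Find min, max
--     min_val = min(nums)
--     max_val = max(nums)
--
--     # look for a number not min and not max
--     for num in nums:
--         if num != min_val and num != max_val:
--             return num
--     return -1
-- ===== SOURCE B (Python) =====
-- def goldilocks_approved(nums):
--     if len(nums) < 3: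
--         return -1
--     # index of the first occurrence of each distinct value, built once
--     first = {}
--     for i, v in enumerate(nums):
--         if v not in first:
--             first[v] = i
--     lo = min(first)
--     if lo <= 0:
--         return -1
--     hi = max(first)
--     mids = [i for v, i in first.items() if v != lo and v != hi]
--     if not mids:
--         return -1
--     return nums[min(mids)]
-- ===== Notes on version B (the rewrite author's own statement) =====
-- stated objective: alternative
-- what changed: B replaces A's positivity pass and first-match scan with a first-occurrence-index dictionary built in one pass: validation becomes min(keys) > 0 and the answer is nums[min of the first indices of values that are neither min nor max], so A's final scan over nums disappears.
import Mathlib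
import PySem

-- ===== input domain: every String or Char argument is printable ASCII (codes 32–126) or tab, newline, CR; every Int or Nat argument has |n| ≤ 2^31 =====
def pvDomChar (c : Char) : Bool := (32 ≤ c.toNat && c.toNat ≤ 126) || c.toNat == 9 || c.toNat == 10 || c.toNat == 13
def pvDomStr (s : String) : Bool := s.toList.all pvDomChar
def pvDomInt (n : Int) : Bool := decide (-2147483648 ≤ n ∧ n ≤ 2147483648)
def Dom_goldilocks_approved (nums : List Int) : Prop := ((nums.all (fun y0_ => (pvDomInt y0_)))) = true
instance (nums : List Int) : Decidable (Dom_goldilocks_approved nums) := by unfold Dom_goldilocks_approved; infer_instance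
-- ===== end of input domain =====

-- B replaces the positivity pass and the first-match scan with a first-occurrence-index
-- dictionary built once: the answer is nums[min of first indices of non-extreme values];
-- objective: alternative (different data structure, same O(n) cost up to hashing).


-- ===== PORT A =====
-- for num in nums: if num <= 0: return -1   (early-return positivity loop)
def gaPosLoop : List Int → Bool
  | [] => false
  | n :: rest => if n ≤ 0 then true else gaPosLoop rest

-- for num in nums: if num != min_val and num != max_val: return num / return -1
def gaFindLoop (mn mx : Int) : List Int → Int
  | [] => -1
  | n :: rest => if n ≠ mn ∧ n ≠ mx then n else gaFindLoop mn mx rest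

def goldilocks_approved (nums : List Int) : Int :=
  if nums.length < 3 then -1
  else if gaPosLoop nums then -1
  else
    match PySem.List.min? nums (fun x => x), PySem.List.max? nums (fun x => x) with
    | some mn, some mx => gaFindLoop mn mx nums
    | _, _ => -1  -- unreachable: nums is nonempty here

-- ===== PORT B =====
-- loop body: if v not in first: first[v] = i   (p = (i, v) from enumerate)
def gbStep (d : PySem.Dict Int Int) (p : Int × Int) : PySem.Dict Int Int :=
  if d.contains p.2 then d else d.insert p.2 p.1

-- everything after the dict is built: lo = min(first), hi = max(first), mids, nums[min(mids)]
def gbLookup (nums : List Int) (first : PySem.Dict Int Int) : Int :=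
  match PySem.List.min? first.keys (fun x => x) with
  | none => -1  -- unreachable: nums is nonempty
  | some lo =>
    if lo ≤ 0 then -1
    else
      match PySem.List.max? first.keys (fun x => x) with
      | none => -1  -- unreachable
      | some hi =>
        match PySem.List.min? ((first.items.filter (fun p => p.1 != lo && p.1 != hi)).map (·.2)) (fun x => x) with
        | none => -1  -- "if not mids: return -1"
        | some j =>
          match PySem.List.pyGet? nums j with
          | none => -1  -- unreachable: j is a valid index
          | some x => x

def goldilocks_approved_alt (nums : List Int) : Int :=
  if nums.length < 3 then -1
  else gbLookup nums ((PySem.List.enumerate nums 0).foldl gbStep PySem.Dict.empty)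

-- ===== PRECONDITION & SPEC =====
def Spec_goldilocks_approved (nums : List Int) (out : Int) : Prop := out = goldilocks_approved_alt nums
instance (nums : List Int) (out : Int) : Decidable (Spec_goldilocks_approved nums out) := by unfold Spec_goldilocks_approved; infer_instance

-- ===== CLAIM (what is proved, stated in full; the proofs are below) =====
def Claim_equal_goldilocks_approved : Prop := ∀ (nums : List Int), Dom_goldilocks_approved nums → Spec_goldilocks_approved nums (goldilocks_approved nums)

-- ===== LEMMAS AND PROOFS =====

-- A's positivity loop is true iff some element is ≤ 0
theorem gaPosLoop_iff (xs : List Int) : gaPosLoop xs = true ↔ ∃ x ∈ xs, x ≤ 0 := by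
  induction xs with
  | nil => simp [gaPosLoop]
  | cons a t ih =>
      simp only [gaPosLoop]
      split_ifs with h
      · simp; exact Or.inl h
      · simp [ih]; intro hx; omega

-- the fold building the first-occurrence dict: full lookup characterisation
theorem gbFold_get? (xs : List Int) (s : Int) (d : PySem.Dict Int Int) (v : Int) :
    (((PySem.List.enumerate xs s).foldl gbStep d).get? v) =
      if d.contains v then d.get? v
      else Option.map (fun k : Nat => s + (k : Int)) (PySem.List.index? xs v) := by
  induction xs generalizing s d with
  | nil =>
      simp only [PySem.List.enumerate_nil, List.foldl_nil, PySem.List.index?_eq_idxOf?,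
        List.idxOf?_nil]
      by_cases hc : d.contains v = true
      · rw [if_pos hc]
      · rw [if_neg hc]
        exact (PySem.Dict.get?_eq_none_iff_contains d v).mpr (by simpa using hc)
  | cons x t ih =>
      simp only [PySem.List.enumerate_cons, List.foldl_cons]
      rw [ih]
      by_cases hcx : d.contains x = true
      · have hstep : gbStep d (s, x) = d := by simp [gbStep, hcx]
        rw [hstep]
        by_cases hcv : d.contains v = true
        · rw [if_pos hcv, if_pos hcv]
        · have hxv : x ≠ v := fun h => hcv (h ▸ hcx)
          rw [if_neg hcv, if_neg hcv, PySem.List.index?_cons_of_ne _ hxv]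
          cases PySem.List.index? t v with
          | none => rfl
          | some k => simp; ring
      · have hstep : gbStep d (s, x) = d.insert x s := by simp [gbStep, hcx]
        rw [hstep]
        by_cases hxv : x = v
        · subst hxv
          rw [if_pos (by simp [PySem.Dict.contains_insert _ _ _ _]),
              PySem.Dict.get?_insert_self, if_neg hcx, PySem.List.index?_cons_self]
          simp
        · have hci : (d.insert x s).contains v = d.contains v := by
            simp [PySem.Dict.contains_insert, Ne.symm hxv]
          rw [hci, PySem.Dict.get?_insert_of_ne _ _ (Ne.symm hxv),
              PySem.List.index?_cons_of_ne _ hxv]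
          by_cases hcv : d.contains v = true
          · rw [if_pos hcv, if_pos hcv]
          · rw [if_neg hcv, if_neg hcv]
            cases PySem.List.index? t v with
            | none => rfl
            | some k => simp; ring

theorem gbFold_nodup (xs : List Int) (s : Int) (d : PySem.Dict Int Int)
    (hd : d.keys.Nodup) : ((PySem.List.enumerate xs s).foldl gbStep d).keys.Nodup := by
  induction xs generalizing s d with
  | nil => simpa [PySem.List.enumerate_nil] using hd
  | cons x t ih =>
      simp only [PySem.List.enumerate_cons, List.foldl_cons]
      refine ih (s + 1) _ ?_
      by_cases hcx : d.contains x = true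
      · simpa [gbStep, hcx] using hd
      · simp only [gbStep, hcx]
        simpa [gbStep, hcx] using PySem.Dict.nodup_keys_insert d x s hd

-- A's find loop returns -1 when every element is an extreme
theorem gaFindLoop_none (mn mx : Int) (xs : List Int)
    (h : ∀ x ∈ xs, x = mn ∨ x = mx) : gaFindLoop mn mx xs = -1 := by
  induction xs with
  | nil => rfl
  | cons a t ih =>
      have := h a (by simp)
      simp only [gaFindLoop]
      rw [if_neg (by tauto)]
      exact ih (fun x hx => h x (by simp [hx]))

-- A's find loop returns the element at the least qualifying index
theorem gaFindLoop_at (mn mx : Int) (xs : List Int) (m : Nat) (hm : m < xs.length)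
    (hq : xs[m] ≠ mn ∧ xs[m] ≠ mx)
    (hmin : ∀ j (hj : j < m), xs[j]'(by omega) = mn ∨ xs[j]'(by omega) = mx) :
    gaFindLoop mn mx xs = xs[m] := by
  induction xs generalizing m with
  | nil => simp at hm
  | cons a t ih =>
      cases m with
      | zero => simp only [gaFindLoop]; rw [if_pos (by simpa using hq)]; simp
      | succ m' =>
          have ha := hmin 0 (by omega)
          simp only [gaFindLoop]
          rw [if_neg (by simp at ha ⊢; tauto)]
          exact ih m' (by simpa using hm) (by simpa using hq)
              (fun j hj => by simpa using hmin (j+1) (by omega))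

-- ===== VERDICT (by name: the statement is the Claim_ definition above) =====
theorem goldilocks_approved_spec : Claim_equal_goldilocks_approved := by
  intro nums _
  unfold Spec_goldilocks_approved goldilocks_approved goldilocks_approved_alt
  by_cases hlen : nums.length < 3
  · simp [hlen]
  · rw [if_neg hlen, if_neg hlen]
    have hne : nums ≠ [] := by intro h; subst h; simp at hlen
    set d := (PySem.List.enumerate nums 0).foldl gbStep PySem.Dict.empty with hdDef
    have hget : ∀ v, d.get? v =
        Option.map (fun k : Nat => (0 : Int) + (k : Int)) (PySem.List.index? nums v) := by
      intro v
      rw [hdDef, gbFold_get?, if_neg (by simp)]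
    have hnodup : d.keys.Nodup := gbFold_nodup nums 0 _ (by simp)
    have hkeys : ∀ v, v ∈ d.keys ↔ v ∈ nums := by
      intro v
      rw [← not_iff_not, ← PySem.Dict.get?_eq_none_iff_not_mem_keys, hget v,
        Option.map_eq_none_iff, PySem.List.index?_eq_none_iff]
    obtain ⟨mn, hmn⟩ : ∃ mn, PySem.List.min? nums (fun x => x) = some mn := by
      cases h : PySem.List.min? nums (fun x => x) with
      | none => exact absurd ((PySem.List.min?_eq_none_iff _ _).mp h) hne
      | some m => exact ⟨m, rfl⟩
    obtain ⟨mx, hmx⟩ : ∃ mx, PySem.List.max? nums (fun x => x) = some mx := by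
      cases h : PySem.List.max? nums (fun x => x) with
      | none => exact absurd ((PySem.List.max?_eq_none_iff _ _).mp h) hne
      | some m => exact ⟨m, rfl⟩
    have hkne : d.keys ≠ [] := by
      obtain ⟨x, hx⟩ := List.exists_mem_of_ne_nil nums hne
      intro h
      exact absurd ((hkeys x).mpr hx) (by simp [h])
    obtain ⟨lo, hlo⟩ : ∃ lo, PySem.List.min? d.keys (fun x => x) = some lo := by
      cases h : PySem.List.min? d.keys (fun x => x) with
      | none => exact absurd ((PySem.List.min?_eq_none_iff _ _).mp h) hkne
      | some m => exact ⟨m, rfl⟩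
    obtain ⟨hi, hhi⟩ : ∃ hi, PySem.List.max? d.keys (fun x => x) = some hi := by
      cases h : PySem.List.max? d.keys (fun x => x) with
      | none => exact absurd ((PySem.List.max?_eq_none_iff _ _).mp h) hkne
      | some m => exact ⟨m, rfl⟩
    have hlomn : lo = mn :=
      le_antisymm
        (PySem.List.min?_isMin hlo mn ((hkeys mn).mpr (PySem.List.min?_mem hmn)))
        (PySem.List.min?_isMin hmn lo ((hkeys lo).mp (PySem.List.min?_mem hlo)))
    have hhimx : hi = mx :=
      le_antisymm
        (PySem.List.max?_isMax hmx hi ((hkeys hi).mp (PySem.List.max?_mem hhi)))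
        (PySem.List.max?_isMax hhi mx ((hkeys mx).mpr (PySem.List.max?_mem hmx)))
    have hmnmem := PySem.List.min?_mem hmn
    have hmnmin := PySem.List.min?_isMin hmn
    have hmxmax := PySem.List.max?_isMax hmx
    unfold gbLookup
    rw [hmn, hmx, hlo, hhi, hlomn, hhimx]
    by_cases hp : gaPosLoop nums = true
    · obtain ⟨x, hx, hx0⟩ := (gaPosLoop_iff nums).mp hp
      have : mn ≤ 0 := le_trans (hmnmin x hx) hx0
      simp [hp, this]
    · have hmn0 : ¬ mn ≤ 0 := fun h0 => hp ((gaPosLoop_iff nums).mpr ⟨mn, hmnmem, h0⟩)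
      simp only [hp, Bool.false_eq_true, if_false, if_neg hmn0]
      set mids := (d.items.filter (fun p => p.1 != mn && p.1 != mx)).map (·.2) with hmids
      have hmem : ∀ i, i ∈ mids ↔
          ∃ v k, v ≠ mn ∧ v ≠ mx ∧ PySem.List.index? nums v = some k ∧ i = (0 : Int) + (k : Int) := by
        intro i
        rw [hmids]
        simp only [List.mem_map, List.mem_filter]
        constructor
        · rintro ⟨⟨v, i'⟩, ⟨hvi, hq⟩, rfl⟩
          have := (PySem.Dict.get?_eq_some_iff_mem_items d v i' hnodup).mpr hvi
          rw [hget v] at this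
          obtain ⟨k, hk, hik⟩ := Option.map_eq_some_iff.mp this
          simp only [bne_iff_ne, Bool.and_eq_true] at hq
          exact ⟨v, k, hq.1, hq.2, hk, hik.symm⟩
        · rintro ⟨v, k, h1, h2, hk, rfl⟩
          refine ⟨(v, (0 : Int) + (k : Int)), ⟨?_, ?_⟩, rfl⟩
          · exact (PySem.Dict.get?_eq_some_iff_mem_items d v _ hnodup).mp (by rw [hget v, hk]; rfl)
          · simp [h1, h2]
      cases hjm : PySem.List.min? mids (fun x => x) with
      | none =>
          have hempty : mids = [] := (PySem.List.min?_eq_none_iff _ _).mp hjm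
          rw [gaFindLoop_none mn mx nums ?_]
          · intro x hx
            by_contra hcon
            push Not at hcon
            obtain ⟨k, hk⟩ := Option.isSome_iff_exists.mp
              ((PySem.List.index?_isSome_iff nums x).mpr hx)
            have : ((0 : Int) + (k : Int)) ∈ mids := (hmem _).mpr ⟨x, k, hcon.1, hcon.2, hk, rfl⟩
            rw [hempty] at this
            simp at this
      | some j =>
          obtain ⟨v, k, hv1, hv2, hvk, hjk⟩ := (hmem j).mp (PySem.List.min?_mem hjm)
          obtain ⟨hklt, hnk, hfirst⟩ := PySem.List.getElem_of_index?_eq_some hvk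
          have hj' : j = ((k : Nat) : Int) := by omega
          have hmin : ∀ j' (hj'lt : j' < k), nums[j']'(by omega) = mn ∨ nums[j']'(by omega) = mx := by
            intro j' hj'lt
            by_contra hcon
            push Not at hcon
            obtain ⟨k', hk'⟩ := Option.isSome_iff_exists.mp
              ((PySem.List.index?_isSome_iff nums (nums[j'])).mpr (List.getElem_mem _))
            obtain ⟨hk'lt, hnk', hfirst'⟩ := PySem.List.getElem_of_index?_eq_some hk'
            have hk'le : k' ≤ j' := by
              by_contra h
              exact hfirst' j' (by omega) rfl
            have hin : ((0 : Int) + (k' : Int)) ∈ mids :=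
              (hmem _).mpr ⟨nums[j'], k', hcon.1, hcon.2, hk', rfl⟩
            have := PySem.List.min?_isMin hjm _ hin
            simp only at this
            omega
          rw [hj']
          simp only [PySem.List.pyGet?_natCast, List.getElem?_eq_getElem hklt]
          exact gaFindLoop_at mn mx nums k hklt (by rw [hnk]; exact ⟨hv1, hv2⟩) hmin
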